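-- pv_equiv track=rewrite | github.com/OliverVier/aoc2022 | day_6/script_6.py | findStartMarker
-- ===== SOURCE A (Python) =====
-- def findStartMarker(line):
--     start_characters = [] #Always contains for characters
--     sop_marker = 0
--     is_Found = True
--     line_string = list(line)
--
--     for i in range(0, len(line_string), 1):
--         start_characters.append(line_string[i])
--         if(len(start_characters) > 4):
--             start_characters.remove(start_characters[0])
--         if(len(start_characters) == 4):
--             #Check characters, if they are all different
--             for z in range(0, len(start_characters), 1):
--                 for k in range(0, len(start_characters), 1):
--                     if(int(k) == int(z)):
--                         continue
--                     if(str(start_characters[z]) == str(start_characters[k])):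
--                         is_Found = False
--             if(is_Found == True):
--                 sop_marker=i+1
--                 return start_characters, sop_marker
--             is_Found = True
-- ===== SOURCE B (Python) =====
-- def findStartMarker(line):
--     for i in range(len(line) - 3):
--         w = list(line[i:i+4])
--         if len(set(w)) == 4:
--             return w, i + 4
-- ===== Notes on version B (the rewrite author's own statement) =====
-- stated objective: simpler
-- what changed: B replaces A's maintained sliding list (append/remove with leftover state) and all-pairs nested comparison loops by a stateless scan over window-start indices that slices each 4-char window and tests distinctness with len(set(w)) == 4.
-- outside the precondition, e.g. on findStartMarker('abc'): A returns None, B returns None; on findStartMarker('aabb'): A returns None, B returns None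
import Mathlib
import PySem

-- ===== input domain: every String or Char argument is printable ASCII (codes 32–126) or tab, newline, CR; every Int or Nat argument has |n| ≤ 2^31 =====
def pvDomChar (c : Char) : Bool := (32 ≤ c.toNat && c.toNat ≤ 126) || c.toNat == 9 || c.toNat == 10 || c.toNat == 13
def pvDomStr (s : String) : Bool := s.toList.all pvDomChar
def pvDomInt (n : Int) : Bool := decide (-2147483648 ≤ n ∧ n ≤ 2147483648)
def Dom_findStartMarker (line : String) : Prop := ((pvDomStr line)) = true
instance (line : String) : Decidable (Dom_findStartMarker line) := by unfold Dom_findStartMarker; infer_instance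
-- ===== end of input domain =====

-- B scans window-start indices and tests each sliced 4-char window with a set, instead of A's
-- maintained sliding list with all-pairs nested comparison loops; same results, simpler code.

-- ===== PORT A =====
-- A's inner nested z/k loops: a Bool accumulator set to false whenever two distinct positions
-- hold equal characters (str(...) on a 1-char string is the string itself; int(k)==int(z) is k==z).
def pvPairCheckA (acc : List String) : Bool :=
  (List.range acc.length).foldl (fun b z =>
    (List.range acc.length).foldl (fun b2 k =>
      if k = z then b2
      else if acc.getD z "" = acc.getD k "" then false else b2) b) true

-- the for-loop over i; acc is start_characters, i the running index.
-- start_characters.remove(start_characters[0]) removes the first occurrence of the head,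
-- i.e. the head itself: PySem.List.remove? on the head, exact (getD unreachable: head ∈ list).
def pvLoopA (rest : List Char) (i : Int) (acc : List String) : List String × Int :=
  match rest with
  | [] => ([], 0)   -- Python falls off the loop and returns None; excluded by Pre_
  | c :: rest' =>
    let acc1 := acc ++ [String.singleton c]
    let acc2 := if acc1.length > 4
                then (PySem.List.remove? acc1 (acc1.getD 0 "")).getD acc1
                else acc1
    if acc2.length = 4 ∧ pvPairCheckA acc2 = true
    then (acc2, i + 1)
    else pvLoopA rest' (i + 1) acc2

def findStartMarker (line : String) : List String × Int :=
  pvLoopA line.toList 0 []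

-- ===== PORT B =====
-- for i in range(len(line)-3): w = list(line[i:i+4]); if len(set(w)) == 4: return w, i+4
def pvLoopB (cs : List Char) (i : Nat) : List String × Int :=
  if h : i + 4 ≤ cs.length then
    let w := ((cs.drop i).take 4).map String.singleton
    if (PySem.Set.ofList w).length = 4 then (w, (i : Int) + 4)
    else pvLoopB cs (i + 1)
  else ([], 0)   -- Python falls through and returns None; excluded by Pre_
termination_by cs.length - i

def findStartMarker_alt (line : String) : List String × Int :=
  pvLoopB line.toList 0

-- ===== PRECONDITION & SPEC =====
-- Pre_ excludes exactly the inputs with no 4-distinct-character window, on which Python A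
-- (and B) fall off the loop and return None, which is not a value of the declared tuple type.
def Pre_findStartMarker (line : String) : Prop :=
  ∃ i < line.toList.length, i + 4 ≤ line.toList.length ∧ ((line.toList.drop i).take 4).Nodup
instance (line : String) : Decidable (Pre_findStartMarker line) := by
  unfold Pre_findStartMarker; infer_instance

def pvWitness_findStartMarker : String := "aabcd"

def Spec_findStartMarker (line : String) (out : List String × Int) : Prop := out = findStartMarker_alt line
instance (line : String) (out : List String × Int) : Decidable (Spec_findStartMarker line out) := by unfold Spec_findStartMarker; infer_instance

-- ===== CLAIM (what is proved, stated in full; the proofs are below) =====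
def Claim_equal_findStartMarker : Prop := ∀ (line : String), Dom_findStartMarker line → Pre_findStartMarker line → Spec_findStartMarker line (findStartMarker line)

-- ===== LEMMAS AND PROOFS =====

-- A's pair check on a length-4 list is exactly Nodup.
theorem pairCheckA_eq_nodup (a b c d : String) :
    pvPairCheckA [a, b, c, d] = true ↔ ([a, b, c, d] : List String).Nodup := by
  simp only [pvPairCheckA]
  simp [List.range, List.range.loop, List.foldl]
  by_cases hab : a = b <;> by_cases hac : a = c <;> by_cases had : a = d <;>
    by_cases hbc : b = c <;> by_cases hbd : b = d <;> by_cases hcd : c = d <;>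
    simp_all <;>
    exact ⟨fun h => hcd h.symm, fun h => hbd h.symm, fun h => had h.symm,
           fun h => hbc h.symm, fun h => hac h.symm, fun h => hab h.symm⟩

-- B's set test on a length-4 list is exactly Nodup.
theorem setLen_eq_nodup (w : List String) (hw : w.length = 4) :
    (PySem.Set.ofList w).length = 4 ↔ w.Nodup := by
  have hn := PySem.Set.nodup_ofList w
  have hsub : PySem.Set.ofList w ⊆ w := fun x hx => (PySem.Set.mem_ofList w x).1 hx
  have hsup : w ⊆ PySem.Set.ofList w := fun x hx => (PySem.Set.mem_ofList w x).2 hx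
  constructor
  · intro h
    have hperm : List.Perm (PySem.Set.ofList w) w :=
      ((List.Nodup.subperm hn hsub)).perm_of_length_le (by omega)
    exact hperm.nodup_iff.mp hn
  · intro hnd
    have h1 := ((List.Nodup.subperm hn hsub)).length_le
    have h2 := ((List.Nodup.subperm hnd hsup)).length_le
    omega

-- proof-only helper: acc at step m is the last ≤4 processed chars, as 1-char strings
def pvWin (cs : List Char) (m : Nat) : List String :=
  ((cs.take m).drop (m - 4)).map String.singleton

theorem pvWin_length (cs : List Char) (m : Nat) (hm : m ≤ cs.length) :
    (pvWin cs m).length = min m 4 := by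
  simp [pvWin]
  omega

theorem pvWin_acc1 (cs : List Char) (m : Nat) (hm : m < cs.length) :
    pvWin cs m ++ [String.singleton (cs.getD m ' ')]
      = ((cs.take (m + 1)).drop (m - 4)).map String.singleton := by
  have htake : cs.take (m + 1) = cs.take m ++ [cs.getD m ' '] := by
    rw [List.take_add_one]
    congr 1
    simp [List.getD, List.getElem?_eq_getElem hm]
  rw [htake, List.drop_append_of_le_length (by simp; omega), List.map_append]
  simp [pvWin]

-- the one-step update of A's acc reproduces pvWin at m+1
theorem pvWin_step (cs : List Char) (m : Nat) (hm : m < cs.length) :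
    (let acc1 := pvWin cs m ++ [String.singleton (cs.getD m ' ')]
     if acc1.length > 4
     then (PySem.List.remove? acc1 (acc1.getD 0 "")).getD acc1
     else acc1) = pvWin cs (m + 1) := by
  have hacc1 := pvWin_acc1 cs m hm
  have hlen : (pvWin cs m ++ [String.singleton (cs.getD m ' ')]).length = min m 4 + 1 := by
    rw [List.length_append, pvWin_length cs m (le_of_lt hm)]; rfl
  simp only []
  by_cases h4 : m < 4
  · rw [if_neg (by rw [hlen]; omega), hacc1]
    have h0 : m - 4 = m + 1 - 4 := by omega
    simp only [pvWin, h0]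
  · push_neg at h4
    rw [if_pos (by rw [hlen]; omega)]
    obtain ⟨e, l', hl⟩ : ∃ e l', (cs.take (m + 1)).drop (m - 4) = e :: l' := by
      cases hh : (cs.take (m + 1)).drop (m - 4) with
      | nil =>
        exfalso
        have := congrArg List.length hh
        simp at this
        omega
      | cons e l' => exact ⟨e, l', rfl⟩
    rw [hacc1, hl]
    simp only [List.map_cons, List.getD, List.getElem?_cons_zero, Option.getD_some,
               PySem.List.remove?_cons_self, Option.getD_some]
    have : pvWin cs (m + 1) = (((cs.take (m + 1)).drop (m - 4)).drop 1).map String.singleton := by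
      simp only [pvWin, List.drop_drop]
      congr 2
      omega
    rw [this, hl]
    rfl

-- the main correspondence: A from step m with the invariant window equals B from index m - 3
theorem loop_corr (cs : List Char) (m : Nat) (hm : m ≤ cs.length) :
    pvLoopA (cs.drop m) m (pvWin cs m) = pvLoopB cs (m - 3) := by
  induction hn : cs.length - m using Nat.strong_induction_on generalizing m with
  | _ n ih =>
  cases Nat.lt_or_ge m cs.length with
  | inr hge =>
    rw [List.drop_of_length_le hge, pvLoopA, pvLoopB, dif_neg (by omega)]
  | inl hlt =>
    obtain ⟨c, rest', hdrop⟩ : ∃ c rest', cs.drop m = c :: rest' := by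
      cases hh : cs.drop m with
      | nil => exfalso; have := List.drop_eq_nil_iff.1 hh; omega
      | cons c rest' => exact ⟨c, rest', rfl⟩
    have hc : c = cs.getD m ' ' := by
      have h0 : (cs.drop m)[0]? = some c := by rw [hdrop]; rfl
      rw [List.getElem?_drop, Nat.add_zero] at h0
      simp [List.getD, h0]
    have hrest' : rest' = cs.drop (m + 1) := by
      have h1 : (cs.drop m).drop 1 = cs.drop (m + 1) := by rw [List.drop_drop]
      rw [hdrop] at h1; simpa using h1
    rw [hdrop, pvLoopA]
    have hwstep := pvWin_step cs m hlt
    simp only at hwstep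
    rw [← hc] at hwstep
    simp only [hwstep]
    have hIH : pvLoopA (cs.drop (m + 1)) (m + 1) (pvWin cs (m + 1)) = pvLoopB cs (m + 1 - 3) :=
      ih (cs.length - (m + 1)) (by omega) (m + 1) (by omega) rfl
    have hcast : (m : Int) + 1 = ((m + 1 : Nat) : Int) := by push_cast; ring
    by_cases h4 : 3 ≤ m
    · -- window full at step m: both sides test the same window
      have hwin : pvWin cs (m + 1) = ((cs.drop (m - 3)).take 4).map String.singleton := by
        have e1 : m + 1 - 4 = m - 3 := by omega
        have e2 : m + 1 - (m - 3) = 4 := by omega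
        simp only [pvWin, List.drop_take, e1, e2]
      have hwl : (pvWin cs (m + 1)).length = 4 := by
        rw [pvWin_length cs (m + 1) (by omega)]; omega
      have hB : pvLoopB cs (m - 3) =
          if (PySem.Set.ofList (((cs.drop (m - 3)).take 4).map String.singleton)).length = 4
          then (((cs.drop (m - 3)).take 4).map String.singleton, ((m - 3 : Nat) : Int) + 4)
          else pvLoopB cs (m - 3 + 1) := by
        rw [pvLoopB, dif_pos (by omega)]
      obtain ⟨a, b_, c_, d_, hlist⟩ : ∃ a b c d, pvWin cs (m + 1) = [a, b, c, d] := by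
        match hh : pvWin cs (m + 1) with
        | [a, b, c, d] => exact ⟨a, b, c, d, rfl⟩
        | [] | [_] | [_, _] | [_, _, _] => rw [hh] at hwl; simp at hwl
        | _ :: _ :: _ :: _ :: _ :: _ =>
          rw [hh] at hwl; simp at hwl
      by_cases hnd : (pvWin cs (m + 1)).Nodup
      · have hpc : pvPairCheckA (pvWin cs (m + 1)) = true := by
          rw [hlist]; exact (pairCheckA_eq_nodup _ _ _ _).2 (hlist ▸ hnd)
        have hset : (PySem.Set.ofList (((cs.drop (m - 3)).take 4).map String.singleton)).length = 4 :=
          (setLen_eq_nodup _ (by rw [← hwin]; exact hwl)).2 (hwin ▸ hnd)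
        rw [if_pos ⟨hwl, hpc⟩, hB, if_pos hset, hwin]
        congr 1
        omega
      · have hpc : ¬ (pvPairCheckA (pvWin cs (m + 1)) = true) := by
          rw [hlist]
          intro hcontra
          exact hnd (hlist ▸ ((pairCheckA_eq_nodup _ _ _ _).1 (hlist ▸ hcontra)))
        have hset : ¬ (PySem.Set.ofList (((cs.drop (m - 3)).take 4).map String.singleton)).length = 4 := by
          intro hcontra
          exact hnd ((setLen_eq_nodup _ hwl).1 (by rw [hwin]; exact hcontra))
        rw [hcast] at hIH
        rw [if_neg (by rintro ⟨_, h⟩; exact hpc h), hB, if_neg hset, hrest', hcast, hIH]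
        congr 1
        omega
    · -- m < 3: window not yet full, A continues; B's start index is still 0
      push_neg at h4
      have hwl : (pvWin cs (m + 1)).length = min (m + 1) 4 := pvWin_length cs (m + 1) (by omega)
      rw [hcast] at hIH
      rw [if_neg (by rintro ⟨hl, _⟩; rw [hwl] at hl; omega)]
      rw [hrest', hcast, hIH]
      congr 1
      omega

-- ===== VERDICT (by name: the statement is the Claim_ definition above) =====
theorem findStartMarker_spec : Claim_equal_findStartMarker := by
  intro line _ _
  unfold Spec_findStartMarker findStartMarker findStartMarker_alt
  have := loop_corr line.toList 0 (by omega)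
  simpa [pvWin] using this
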